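-- pv_equiv track=rewrite | github.com/lwantoch/stack_protein_prep | src/stack_protein_preparation/pdb_sync.py | extract_pdb_id_list_from_pdb_record_list
-- ===== SOURCE A (Python) =====
-- PDB_ID_COLUMN_NAME = "pdb_id"
--
-- def normalize_pdb_id(raw_pdb_id: str) -> str:
--     """
--     Normalize a PDB ID by stripping whitespace and converting to uppercase.
--     """
--     return raw_pdb_id.strip().upper()
--
-- def extract_pdb_id_list_from_pdb_record_list(
--     pdb_record_list: list[dict[str, str]],
-- ) -> list[str]:
--     """
--     Extract only the PDB IDs from a list of PDB records.
--
--     This helper is useful because directory creation only needs the PDB ID.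
--     """
--     pdb_id_list: list[str] = []
--     seen_pdb_id_set: set[str] = set()
--
--     for pdb_record in pdb_record_list:
--         normalized_pdb_id = normalize_pdb_id(pdb_record.get(PDB_ID_COLUMN_NAME, ""))
--
--         if not normalized_pdb_id:
--             continue
--
--         if normalized_pdb_id in seen_pdb_id_set:
--             continue
--
--         pdb_id_list.append(normalized_pdb_id)
--         seen_pdb_id_set.add(normalized_pdb_id)
--
--     pdb_id_list.sort()
--     return pdb_id_list
-- ===== SOURCE B (Python) =====
-- PDB_ID_COLUMN_NAME = "pdb_id"
--
--
-- def normalize_pdb_id(raw_pdb_id: str) -> str: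
--     return raw_pdb_id.strip().upper()
--
--
-- def extract_pdb_id_list_from_pdb_record_list(pdb_record_list):
--     normalized_list = [
--         normalize_pdb_id(pdb_record.get(PDB_ID_COLUMN_NAME, ""))
--         for pdb_record in pdb_record_list
--     ]
--     sorted_nonempty_list = sorted(
--         pdb_id for pdb_id in normalized_list if pdb_id
--     )
--     unique_sorted_list = []
--     for pdb_id in sorted_nonempty_list:
--         if not unique_sorted_list or unique_sorted_list[-1] != pdb_id:
--             unique_sorted_list.append(pdb_id)
--     return unique_sorted_list
-- ===== Notes on version B (the rewrite author's own statement) =====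
-- stated objective: alternative
-- what changed: Replaces the hash-set keep-first dedup interleaved with extraction by a map/filter pipeline that sorts first and then removes duplicates in one adjacency scan over the sorted list (no set, no order-preserving accumulator).
import Mathlib
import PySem

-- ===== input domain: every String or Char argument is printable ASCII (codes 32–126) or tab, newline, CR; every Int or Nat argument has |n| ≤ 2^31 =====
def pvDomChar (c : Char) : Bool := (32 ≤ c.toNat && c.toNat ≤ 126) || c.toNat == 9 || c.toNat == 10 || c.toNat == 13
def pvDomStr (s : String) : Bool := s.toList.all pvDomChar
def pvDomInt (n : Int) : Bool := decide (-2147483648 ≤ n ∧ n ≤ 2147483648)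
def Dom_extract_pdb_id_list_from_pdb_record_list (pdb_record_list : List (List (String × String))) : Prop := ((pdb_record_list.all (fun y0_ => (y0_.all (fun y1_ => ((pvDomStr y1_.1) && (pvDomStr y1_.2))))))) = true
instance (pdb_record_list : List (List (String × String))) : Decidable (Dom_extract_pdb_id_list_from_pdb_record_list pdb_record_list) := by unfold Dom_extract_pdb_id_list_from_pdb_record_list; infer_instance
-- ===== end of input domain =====

-- B replaces A's hash-set keep-first dedup (then sort) by map/filter, sort, then one adjacency-dedup scan; same results, similar cost.


-- ===== PORT A =====
-- normalize_pdb_id: raw.strip().upper()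
def pvNormalizePdbId (raw_pdb_id : String) : String :=
  PySem.Str.upper (PySem.Str.strip raw_pdb_id)

-- pdb_record.get("pdb_id", "")
def pvRecordGetPdbId (pdb_record : List (String × String)) : String :=
  PySem.Dict.getD (PySem.Dict.mk pdb_record) "pdb_id" ""

-- loop body of A: state = (pdb_id_list, seen_pdb_id_set)
def pvAStep (st : List String × PySem.Set String) (pdb_record : List (String × String)) :
    List String × PySem.Set String :=
  let normalized_pdb_id := pvNormalizePdbId (pvRecordGetPdbId pdb_record)
  if normalized_pdb_id = "" then st
  else if PySem.Set.contains st.2 normalized_pdb_id then st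
  else (st.1 ++ [normalized_pdb_id], PySem.Set.add st.2 normalized_pdb_id)

def extract_pdb_id_list_from_pdb_record_list (pdb_record_list : List (List (String × String))) : List String :=
  let st := pdb_record_list.foldl pvAStep ([], PySem.Set.empty)
  PySem.List.sorted st.1 (fun x => x) false

-- ===== PORT B =====
-- loop body of B's adjacency-dedup scan over the sorted list
def pvBStep (unique_sorted_list : List String) (pdb_id : String) : List String :=
  if unique_sorted_list = [] ∨ PySem.List.pyGetD unique_sorted_list (-1) "" ≠ pdb_id then
    unique_sorted_list ++ [pdb_id]
  else unique_sorted_list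

def extract_pdb_id_list_from_pdb_record_list_alt (pdb_record_list : List (List (String × String))) : List String :=
  let normalized_list := pdb_record_list.map (fun pdb_record => pvNormalizePdbId (pvRecordGetPdbId pdb_record))
  let sorted_nonempty_list := PySem.List.sorted (normalized_list.filter (fun s => s ≠ "")) (fun x => x) false
  sorted_nonempty_list.foldl pvBStep []

-- ===== PRECONDITION & SPEC =====
def Spec_extract_pdb_id_list_from_pdb_record_list (pdb_record_list : List (List (String × String))) (out : List String) : Prop := out = extract_pdb_id_list_from_pdb_record_list_alt pdb_record_list
instance (pdb_record_list : List (List (String × String))) (out : List String) : Decidable (Spec_extract_pdb_id_list_from_pdb_record_list pdb_record_list out) := by unfold Spec_extract_pdb_id_list_from_pdb_record_list; infer_instance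

-- ===== CLAIM (what is proved, stated in full; the proofs are below) =====
def Claim_equal_extract_pdb_id_list_from_pdb_record_list : Prop := ∀ (pdb_record_list : List (List (String × String))), Dom_extract_pdb_id_list_from_pdb_record_list pdb_record_list → Spec_extract_pdb_id_list_from_pdb_record_list pdb_record_list (extract_pdb_id_list_from_pdb_record_list pdb_record_list)

-- ===== LEMMAS AND PROOFS =====

-- A's loop, started on a duplicate-free list paired with itself as the "seen" set,
-- keeps list = set, stays duplicate-free, and collects exactly the nonempty normalized ids.
lemma pvALoop (rl : List (List (String × String))) (acc : List String) (hnd : acc.Nodup) :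
    (rl.foldl pvAStep (acc, acc)).1.Nodup ∧
    ∀ z, z ∈ (rl.foldl pvAStep (acc, acc)).1 ↔
      z ∈ acc ∨ z ∈ (rl.map (fun r => pvNormalizePdbId (pvRecordGetPdbId r))).filter (fun s => s ≠ "") := by
  induction rl generalizing acc with
  | nil => simpa using hnd
  | cons r rest ih =>
    simp only [List.foldl_cons, List.map_cons, List.filter_cons]
    by_cases he : pvNormalizePdbId (pvRecordGetPdbId r) = ""
    · have hstep : pvAStep (acc, acc) r = (acc, acc) := by
        simp [pvAStep, he]
      rw [hstep]
      simpa [he] using ih acc hnd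
    · by_cases hm : pvNormalizePdbId (pvRecordGetPdbId r) ∈ acc
      · have hstep : pvAStep (acc, acc) r = (acc, acc) := by
          simp [pvAStep, he, hm]
        rw [hstep]
        rcases ih acc hnd with ⟨h1, h2⟩
        refine ⟨h1, fun z => ?_⟩
        rw [h2 z]
        simp only [he, ne_eq, not_false_iff, decide_true, if_true, List.mem_cons]
        constructor
        · rintro (hz | hz)
          · exact Or.inl hz
          · exact Or.inr (Or.inr hz)
        · rintro (hz | hz | hz)
          · exact Or.inl hz
          · exact Or.inl (hz ▸ hm)
          · exact Or.inr hz
      · have hc : PySem.Set.contains acc (pvNormalizePdbId (pvRecordGetPdbId r)) = false := by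
          by_contra h
          exact hm ((PySem.Set.contains_iff acc _).mp (by simpa using h))
        have hstep : pvAStep (acc, acc) r =
            (acc ++ [pvNormalizePdbId (pvRecordGetPdbId r)],
             acc ++ [pvNormalizePdbId (pvRecordGetPdbId r)]) := by
          simp [pvAStep, he, hm]
        rw [hstep]
        have hnd' : (acc ++ [pvNormalizePdbId (pvRecordGetPdbId r)]).Nodup := by
          simp [List.nodup_append, hnd]
          exact fun a ha hco => hm (hco ▸ ha)
        rcases ih (acc ++ [pvNormalizePdbId (pvRecordGetPdbId r)]) hnd' with ⟨h1, h2⟩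
        refine ⟨h1, fun z => ?_⟩
        rw [h2 z]
        simp only [he, ne_eq, not_false_iff, decide_true, if_true, List.mem_cons, List.mem_append]
        simp only [List.not_mem_nil, or_false]
        exact or_assoc

-- in a strictly increasing list every element is ≤ the last one
lemma pvLeGetLast (l : List String) (h : l.Pairwise (· < ·)) (hne : l ≠ []) :
    ∀ x ∈ l, x ≤ l.getLast hne := by
  rcases List.eq_nil_or_concat l with rfl | ⟨o, b, rfl⟩
  · exact absurd rfl hne
  · intro x hx
    have hlast : (o.concat b).getLast hne = b := by
      simp
    rw [hlast]
    simp only [List.concat_eq_append] at hx h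
    rcases List.mem_append.mp hx with hx' | hx'
    · exact le_of_lt ((List.pairwise_append.mp h).2.2 x hx' b (by simp))
    · simp only [List.mem_singleton] at hx'
      exact le_of_eq hx'

-- B's adjacency scan over a ≤-sorted list, from an accumulator whose elements are
-- strictly increasing and all ≤ the remaining input: result is strictly increasing
-- and contains exactly the old plus the scanned elements.
lemma pvBLoop (s : List String) (out : List String)
    (hs : s.Pairwise (· ≤ ·)) (hout : out.Pairwise (· < ·))
    (hle : ∀ x ∈ out, ∀ y ∈ s, x ≤ y) :
    (s.foldl pvBStep out).Pairwise (· < ·) ∧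
    ∀ z, z ∈ s.foldl pvBStep out ↔ z ∈ out ∨ z ∈ s := by
  induction s generalizing out with
  | nil => simpa using hout
  | cons y rest ih =>
    simp only [List.foldl_cons]
    have hs' : rest.Pairwise (· ≤ ·) := (List.pairwise_cons.mp hs).2
    have hyrest : ∀ y' ∈ rest, y ≤ y' := (List.pairwise_cons.mp hs).1
    by_cases hnil : out = []
    · subst hnil
      have hstep : pvBStep [] y = [y] := by simp [pvBStep]
      rw [hstep]
      have hout' : ([y] : List String).Pairwise (· < ·) := by simp
      have hle' : ∀ x ∈ ([y] : List String), ∀ y' ∈ rest, x ≤ y' := by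
        intro x hx y' hy'
        simp only [List.mem_singleton] at hx
        exact hx ▸ hyrest y' hy'
      rcases ih [y] hs' hout' hle' with ⟨h1, h2⟩
      refine ⟨h1, fun z => ?_⟩
      rw [h2 z]
      simp only [List.mem_cons]
      tauto
    · have hlast : PySem.List.pyGetD out (-1) "" = out.getLast hnil :=
        PySem.List.pyGetD_neg_one out "" hnil
      by_cases heq : out.getLast hnil = y
      · have hstep : pvBStep out y = out := by
          simp [pvBStep, hnil, hlast, heq]
        rw [hstep]
        rcases ih out hs' hout (fun x hx y' hy' => hle x hx y' (by simp [hy'])) with ⟨h1, h2⟩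
        refine ⟨h1, fun z => ?_⟩
        rw [h2 z]
        have hymem : y ∈ out := heq ▸ List.getLast_mem hnil
        simp only [List.mem_cons]
        constructor
        · tauto
        · rintro (hz | rfl | hz)
          · exact Or.inl hz
          · exact Or.inl hymem
          · exact Or.inr hz
      · have hstep : pvBStep out y = out ++ [y] := by
          simp [pvBStep, hnil, hlast, heq]
        rw [hstep]
        have hlast_lt : out.getLast hnil < y := by
          have h1 : out.getLast hnil ≤ y :=
            hle _ (List.getLast_mem hnil) y (by simp)
          exact lt_of_le_of_ne h1 heq
        have hout' : (out ++ [y]).Pairwise (· < ·) := by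
          rw [List.pairwise_append]
          refine ⟨hout, by simp, ?_⟩
          intro x hx y' hy'
          simp only [List.mem_singleton] at hy'
          subst hy'
          exact lt_of_le_of_lt (pvLeGetLast out hout hnil x hx) hlast_lt
        have hle' : ∀ x ∈ out ++ [y], ∀ y' ∈ rest, x ≤ y' := by
          intro x hx y' hy'
          rcases List.mem_append.mp hx with hx' | hx'
          · exact hle x hx' y' (by simp [hy'])
          · simp only [List.mem_singleton] at hx'
            exact hx' ▸ hyrest y' hy'
        rcases ih (out ++ [y]) hs' hout' hle' with ⟨h1, h2⟩
        refine ⟨h1, fun z => ?_⟩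
        rw [h2 z]
        simp only [List.mem_append, List.mem_cons]
        tauto

-- ===== VERDICT (by name: the statement is the Claim_ definition above) =====
theorem extract_pdb_id_list_from_pdb_record_list_spec : Claim_equal_extract_pdb_id_list_from_pdb_record_list := by
  intro rl _
  unfold Spec_extract_pdb_id_list_from_pdb_record_list
  unfold extract_pdb_id_list_from_pdb_record_list extract_pdb_id_list_from_pdb_record_list_alt
  simp only []
  have hempty : (PySem.Set.empty : PySem.Set String) = ([] : List String) := rfl
  rw [hempty]
  have hA := pvALoop rl [] (by simp)
  have hSsorted :
      (PySem.List.sorted ((rl.map (fun r => pvNormalizePdbId (pvRecordGetPdbId r))).filter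
        (fun s => s ≠ "")) (fun x => x) false).Pairwise (· ≤ ·) := by
    simpa using PySem.List.sorted_pairwise
      ((rl.map (fun r => pvNormalizePdbId (pvRecordGetPdbId r))).filter (fun s => s ≠ ""))
      (fun x => x)
  have hB := pvBLoop _ [] hSsorted (by simp) (by simp)
  have hRnodup : (((PySem.List.sorted ((rl.map (fun r => pvNormalizePdbId (pvRecordGetPdbId r))).filter
        (fun s => s ≠ "")) (fun x => x) false)).foldl pvBStep []).Nodup :=
    hB.1.imp (fun h => ne_of_lt h)
  have hperm : (((PySem.List.sorted ((rl.map (fun r => pvNormalizePdbId (pvRecordGetPdbId r))).filter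
        (fun s => s ≠ "")) (fun x => x) false)).foldl pvBStep []).Perm
      ((rl.foldl pvAStep ([], [])).1) := by
    rw [List.perm_ext_iff_of_nodup hRnodup hA.1]
    intro z
    rw [hB.2 z, hA.2 z]
    simp [PySem.List.mem_sorted]
  exact PySem.List.sorted_eq_of_perm_of_pairwise_lt _ _ (fun x => x) hperm hB.1
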